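-- pv_equiv track=rewrite | github.com/diyanqi/tasoj | lib.py | is_valid_nickname
-- ===== SOURCE A (Python) =====
-- def is_valid_nickname(nickname):
--     invalid=[' ','&',';','<','>','%','\'','`','"']
--     if(len(nickname)==0):
--         return False
--     for i in invalid:
--         if(i in nickname):
--             return False
--     # check if there is unvisable char in nickname
--     if(not nickname.isprintable()):
--         return False
--     return True
-- ===== SOURCE B (Python) =====
-- def is_valid_nickname(nickname):
--     if len(nickname) == 0:
--         return False
--     forbidden = {' ', '&', ';', '<', '>', '%', '\'', '`', '"'}
--     for c in nickname:
--         if c in forbidden or not c.isprintable():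
--             return False
--     return True
-- ===== Notes on version B (the rewrite author's own statement) =====
-- stated objective: idiomatic
-- what changed: Replaced A's nine separate whole-string substring scans plus a final isprintable pass by one single character-by-character pass that checks set membership and printability at once.
import Mathlib
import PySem

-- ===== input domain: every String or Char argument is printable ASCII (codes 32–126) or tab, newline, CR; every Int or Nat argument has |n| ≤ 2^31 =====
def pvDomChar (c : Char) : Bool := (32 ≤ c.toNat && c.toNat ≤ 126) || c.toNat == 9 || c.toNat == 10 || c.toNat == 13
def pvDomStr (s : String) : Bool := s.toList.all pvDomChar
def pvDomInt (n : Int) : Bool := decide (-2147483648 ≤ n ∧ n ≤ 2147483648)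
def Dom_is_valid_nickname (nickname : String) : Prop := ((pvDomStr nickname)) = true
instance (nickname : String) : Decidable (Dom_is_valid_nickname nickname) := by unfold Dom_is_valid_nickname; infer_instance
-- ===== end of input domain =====

-- B makes one single character-by-character pass instead of A's nine whole-string substring scans plus an isprintable pass (idiomatic; return values proved equal on Dom).

-- str.isprintable for one char; exact on the Dom alphabet (of printable ASCII 32–126 plus tab/newline/CR, exactly codes 32–126 are printable)
def pyPrintableChar (c : Char) : Bool := 32 ≤ c.toNat && c.toNat ≤ 126

-- ===== PORT A =====
def is_valid_nickname (nickname : String) : Bool :=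
  let invalid : List String := [" ", "&", ";", "<", ">", "%", "'", "`", "\""]
  if PySem.Str.len nickname == 0 then false
  else if invalid.any (fun i => PySem.Str.isIn i nickname) then false  -- the for-loop with early return
  else if !(nickname.toList.all pyPrintableChar) then false            -- nickname.isprintable(), exact on Dom
  else true

-- ===== PORT B =====
def is_valid_nickname_alt (nickname : String) : Bool :=
  if nickname.toList.isEmpty then false
  else
    let forbidden : List Char := [' ', '&', ';', '<', '>', '%', '\'', '`', '"']
    nickname.toList.all (fun c => !(forbidden.contains c || !pyPrintableChar c))  -- the per-char loop with early return

-- ===== PRECONDITION & SPEC =====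
def Spec_is_valid_nickname (nickname : String) (out : Bool) : Prop := out = is_valid_nickname_alt nickname
instance (nickname : String) (out : Bool) : Decidable (Spec_is_valid_nickname nickname out) := by unfold Spec_is_valid_nickname; infer_instance

-- ===== CLAIM (what is proved, stated in full; the proofs are below) =====
def Claim_equal_is_valid_nickname : Prop := ∀ (nickname : String), Dom_is_valid_nickname nickname → Spec_is_valid_nickname nickname (is_valid_nickname nickname)

-- ===== LEMMAS AND PROOFS =====
theorem singleton_infix_iff (c : Char) (l : List Char) : [c] <:+: l ↔ c ∈ l := by
  constructor
  · intro h; exact h.sublist.subset (List.mem_singleton_self c)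
  · intro h
    obtain ⟨s, t, rfl⟩ := List.append_of_mem h
    exact ⟨s, t, by simp⟩

-- 'i in nickname' for a one-character i is a character-membership test
theorem singleton_isIn_iff (c : Char) (s : String) :
    PySem.Str.isIn (String.ofList [c]) s = s.toList.contains c := by
  have h := PySem.Str.isIn_iff_infix (String.ofList [c]) s
  simp only [String.toList_ofList, singleton_infix_iff] at h
  rcases hb : PySem.Str.isIn (String.ofList [c]) s with _ | _ <;> simp_all

theorem is_valid_nickname_eq_alt (s : String) : is_valid_nickname s = is_valid_nickname_alt s := by
  have e : ∀ c : Char, PySem.Str.isIn (String.ofList [c]) s = s.toList.contains c :=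
    fun c => singleton_isIn_iff c s
  unfold is_valid_nickname is_valid_nickname_alt
  simp only [PySem.Str.len_eq, List.any_cons, List.any_nil,
    show (" " : String) = String.ofList [' '] from rfl,
    show ("&" : String) = String.ofList ['&'] from rfl,
    show (";" : String) = String.ofList [';'] from rfl,
    show ("<" : String) = String.ofList ['<'] from rfl,
    show (">" : String) = String.ofList ['>'] from rfl,
    show ("%" : String) = String.ofList ['%'] from rfl,
    show ("'" : String) = String.ofList ['\''] from rfl,
    show ("`" : String) = String.ofList ['`'] from rfl,
    show ("\"" : String) = String.ofList ['"'] from rfl, e]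
  generalize s.toList = l
  by_cases hl : l = []
  · simp [hl]
  · have h1 : ((l.length : Int) == 0) = false := by simp [hl]
    have h2 : l.isEmpty = false := by simp [hl]
    rw [h1, h2]
    simp only [Bool.false_eq_true, if_false]
    rw [Bool.eq_iff_iff]
    simp [List.all_eq_true]
    constructor
    · rintro ⟨⟨h1,h2,h3,h4,h5,h6,h7,h8,h9⟩, hp⟩ x hx
      exact ⟨⟨fun h => h1 (h ▸ hx), fun h => h2 (h ▸ hx), fun h => h3 (h ▸ hx),
        fun h => h4 (h ▸ hx), fun h => h5 (h ▸ hx), fun h => h6 (h ▸ hx),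
        fun h => h7 (h ▸ hx), fun h => h8 (h ▸ hx), fun h => h9 (h ▸ hx)⟩, hp x hx⟩
    · intro h
      exact ⟨⟨fun hm => ((h _ hm).1).1 rfl, fun hm => ((h _ hm).1).2.1 rfl,
        fun hm => ((h _ hm).1).2.2.1 rfl, fun hm => ((h _ hm).1).2.2.2.1 rfl,
        fun hm => ((h _ hm).1).2.2.2.2.1 rfl, fun hm => ((h _ hm).1).2.2.2.2.2.1 rfl,
        fun hm => ((h _ hm).1).2.2.2.2.2.2.1 rfl, fun hm => ((h _ hm).1).2.2.2.2.2.2.2.1 rfl,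
        fun hm => ((h _ hm).1).2.2.2.2.2.2.2.2 rfl⟩, fun x hx => (h x hx).2⟩

-- ===== VERDICT (by name: the statement is the Claim_ definition above) =====
theorem is_valid_nickname_spec : Claim_equal_is_valid_nickname := by
  intro s _
  exact is_valid_nickname_eq_alt s
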